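-- pv_equiv track=rewrite | github.com/kuco23/pokerlib | pokerlib/_handparser.py | _getStraightIndices
-- ===== SOURCE A (Python) =====
-- def _getStraightIndices(valnums):
--     straightindices = [None] * 5
--     straightlen, indexptr = 1, sum(valnums)
--     for i in reversed(range(len(valnums))):
--         indexptr -= valnums[i]
--         if valnums[i-1] and valnums[i]:
--             straightindices[straightlen-1] = indexptr
--             straightlen += 1
--             if straightlen == 5:
--                 if indexptr == 0:
--                     indexptr = sum(valnums)-1
--                 else: indexptr -= valnums[i-1]
--                 straightindices[4] = indexptr
--                 return straightindices
--         else: straightlen = 1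
-- ===== SOURCE B (Python) =====
-- def _isrun(ok, k, n):
--     return (ok[k] and ok[k + 1] and ok[k + 2] and ok[k + 3]
--             and ok[n - 1 if k == 0 else k - 1])
--
-- def _getStraightIndices(valnums):
--     n = len(valnums)
--     start = [0]
--     for v in valnums:
--         start.append(start[-1] + v)
--     ok = [v != 0 for v in valnums]
--     for k in reversed(range(n - 3)):
--         if _isrun(ok, k, n):
--             j = n - 1 if k == 0 else k - 1
--             last = start[n] - 1 if start[k] == 0 else start[k] - valnums[j]
--             return [start[k + 3], start[k + 2], start[k + 1], start[k], last]
--     return None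
-- ===== Notes on version B (the rewrite author's own statement) =====
-- stated objective: alternative
-- what changed: Instead of A's single streak-carrying scan that mutates a partially-filled answer array, B precomputes a prefix-sum start array and an ok bitmap, then scans candidate straight tops k from high to low, testing each 5-value run (with the ace wheel wrap) independently and building the answer list directly from the prefix sums.
import Mathlib
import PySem

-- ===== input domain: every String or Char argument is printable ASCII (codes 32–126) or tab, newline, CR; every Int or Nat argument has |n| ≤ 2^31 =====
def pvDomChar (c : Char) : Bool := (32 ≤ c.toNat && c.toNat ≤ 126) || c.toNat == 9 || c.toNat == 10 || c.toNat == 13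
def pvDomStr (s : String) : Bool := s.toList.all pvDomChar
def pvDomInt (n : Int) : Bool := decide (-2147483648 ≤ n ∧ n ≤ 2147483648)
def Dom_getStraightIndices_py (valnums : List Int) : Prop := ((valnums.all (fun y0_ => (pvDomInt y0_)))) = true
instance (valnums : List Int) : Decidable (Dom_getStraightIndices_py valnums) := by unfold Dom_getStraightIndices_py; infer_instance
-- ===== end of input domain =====

-- B replaces A's streak-carrying mutable scan by a prefix-sum array plus an independent
-- run test per candidate straight top (alternative decomposition, same cost).

-- ===== PORT A =====
-- valnums[i] / valnums[i-1]: every call site has 0 ≤ i < len, so the Python index is in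
-- range (i-1 = -1 wraps to the last element); the default 0 of pyGetD is never used.
def pvAGet (valnums : List Int) (i : Int) : Int := PySem.List.pyGetD valnums i 0

def pvALoop (valnums : List Int) (idxs : List Nat) (si : List (Option Int))
    (slen : Nat) (ptr : Int) : Option (List (Option Int)) :=
  match idxs with
  | [] => none
  | i :: rest =>
    let ptr' := ptr - pvAGet valnums (i : Int)
    if pvAGet valnums ((i : Int) - 1) != 0 && pvAGet valnums (i : Int) != 0 then
      let si' := si.set (slen - 1) (some ptr')
      if slen + 1 == 5 then
        let fin := if ptr' == 0 then valnums.sum - 1 else ptr' - pvAGet valnums ((i : Int) - 1)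
        some (si'.set 4 (some fin))
      else pvALoop valnums rest si' (slen + 1) ptr'
    else pvALoop valnums rest si 1 ptr'

def getStraightIndices_py (valnums : List Int) : Option (List (Option Int)) :=
  pvALoop valnums ((List.range valnums.length).reverse) (List.replicate 5 none) 1 valnums.sum

-- ===== PORT B =====
-- all list indexing in B is in range at every call site (k ≤ n-4, start has length n+1),
-- so getD's default is never used.
def pvBIsRun (ok : List Bool) (n k : Nat) : Bool :=
  ok.getD k false && ok.getD (k + 1) false && ok.getD (k + 2) false && ok.getD (k + 3) false
    && ok.getD (if k = 0 then n - 1 else k - 1) false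

def pvBLoop (valnums st : List Int) (ok : List Bool) (ks : List Nat) :
    Option (List (Option Int)) :=
  match ks with
  | [] => none
  | k :: rest =>
    if pvBIsRun ok valnums.length k then
      let j := if k = 0 then valnums.length - 1 else k - 1
      let sk := st.getD k 0
      let last := if sk == 0 then st.getD valnums.length 0 - 1 else sk - valnums.getD j 0
      some [some (st.getD (k + 3) 0), some (st.getD (k + 2) 0), some (st.getD (k + 1) 0),
            some sk, some last]
    else pvBLoop valnums st ok rest

def getStraightIndices_py_alt (valnums : List Int) : Option (List (Option Int)) :=
  pvBLoop valnums (valnums.foldl (fun acc x => acc ++ [acc.getLastD 0 + x]) [0])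
    (valnums.map (fun x => x != 0)) ((List.range (valnums.length - 3)).reverse)

-- ===== PRECONDITION & SPEC =====
def Spec_getStraightIndices_py (valnums : List Int) (out : Option (List (Option Int))) : Prop := out = getStraightIndices_py_alt valnums
instance (valnums : List Int) (out : Option (List (Option Int))) : Decidable (Spec_getStraightIndices_py valnums out) := by unfold Spec_getStraightIndices_py; infer_instance

-- ===== CLAIM (what is proved, stated in full; the proofs are below) =====
def Claim_equal_getStraightIndices_py : Prop := ∀ (valnums : List Int), Dom_getStraightIndices_py valnums → Spec_getStraightIndices_py valnums (getStraightIndices_py valnums)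

-- ===== LEMMAS AND PROOFS =====

-- prefix sums
def pvStart (v : List Int) (m : Nat) : Int := (v.take m).sum

-- A's success condition at step i (valnums[i-1] and valnums[i] both truthy), over plain getD
def pvS (v : List Int) (i : Nat) : Bool :=
  (v.getD (if i = 0 then v.length - 1 else i - 1) 0 != 0) && (v.getD i 0 != 0)

theorem pvAGet_eq (v : List Int) (i : Nat) (_h : i < v.length) :
    pvAGet v (i : Int) = v.getD i 0 := by
  simp [pvAGet, List.getD]

theorem pvAGet_pred (v : List Int) (i : Nat) (h : i < v.length) :
    pvAGet v ((i : Int) - 1) = v.getD (if i = 0 then v.length - 1 else i - 1) 0 := by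
  unfold pvAGet
  cases i with
  | zero =>
    have hne : v ≠ [] := by intro hv; simp [hv] at h
    simp only [Nat.cast_zero, zero_sub]
    rw [show ((-1 : Int)) = -1 from rfl, PySem.List.pyGetD_neg_one (h := hne)]
    rw [List.getLast_eq_getElem]
    simp [List.getD, List.getElem?_eq_getElem (show v.length - 1 < v.length by omega)]
  | succ n =>
    have h1 : ((n : Int) + 1 - 1) = (n : Int) := by ring
    push_cast
    rw [h1]
    simp

theorem pvCond_eq (v : List Int) (i : Nat) (h : i < v.length) :
    (pvAGet v ((i : Int) - 1) != 0 && pvAGet v (i : Int) != 0) = pvS v i := by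
  simp [pvS, pvAGet_eq v i h, pvAGet_pred v i h]

theorem pvBool5 (a b c d e : Bool) :
    (b && c && d && e && a) = (a && b && (b && c) && (c && d) && (d && e)) := by
  cases a <;> cases b <;> cases c <;> cases d <;> cases e <;> rfl

theorem pvBIsRun_eq (v : List Int) (k : Nat) :
    pvBIsRun (v.map (fun x => x != 0)) v.length k
      = (pvS v k && pvS v (k + 1) && pvS v (k + 2) && pvS v (k + 3)) := by
  have hm : ∀ j : Nat, (v.map (fun x => x != 0)).getD j false = (v.getD j 0 != 0) := by
    intro j
    simp only [List.getD, List.getElem?_map]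
    cases v[j]? <;> simp
  simp only [pvBIsRun, pvS, hm,
    show (k+1 = 0) = False by simp, show (k+2 = 0) = False by simp,
    show (k+3 = 0) = False by simp, if_false, Nat.add_sub_cancel,
    show k+2-1 = k+1 by omega, show k+3-1 = k+2 by omega]
  exact pvBool5 _ _ _ _ _

theorem pvStart_succ (v : List Int) (i : Nat) (h : i < v.length) :
    pvStart v (i + 1) = pvStart v i + v.getD i 0 := by
  unfold pvStart
  rw [List.take_add_one, List.sum_append]
  simp [List.getElem?_eq_getElem h, List.getD]

def pvAux (c : Int) : List Int → List Int
  | [] => []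
  | x :: xs => (c + x) :: pvAux (c + x) xs

theorem pvFold_eq (l : List Int) : ∀ (acc : List Int) (c : Int), acc.getLastD 0 = c →
    l.foldl (fun acc x => acc ++ [acc.getLastD 0 + x]) acc = acc ++ pvAux c l := by
  induction l with
  | nil => intro acc c _; simp [pvAux]
  | cons x xs ih =>
    intro acc c hc
    simp only [List.foldl_cons, hc, pvAux]
    rw [ih (acc ++ [c + x]) (c + x) (by simp)]
    simp

theorem pvAux_getD (l : List Int) : ∀ (c : Int) (j : Nat), j < l.length →
    (pvAux c l).getD j 0 = c + (l.take (j+1)).sum := by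
  induction l with
  | nil => intro c j hj; simp at hj
  | cons x xs ih =>
    intro c j hj
    cases j with
    | zero => simp [pvAux]
    | succ j =>
      simp only [pvAux, List.getD_cons_succ, List.take_succ_cons, List.sum_cons]
      rw [ih (c + x) j (by simpa using hj)]
      ring

theorem pvPrefix_getD (v : List Int) (k : Nat) (h : k ≤ v.length) :
    (v.foldl (fun acc x => acc ++ [acc.getLastD 0 + x]) [0]).getD k 0 = pvStart v k := by
  rw [pvFold_eq v [0] 0 (by simp)]
  unfold pvStart
  cases k with
  | zero => simp
  | succ k =>
    have h2 : ([(0:Int)] ++ pvAux 0 v).getD (k+1) 0 = (pvAux 0 v).getD k 0 := by simp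
    rw [h2, pvAux_getD v 0 k (by omega)]
    simp

theorem pvRangeRev (m : Nat) : (List.range (m+1)).reverse = m :: (List.range m).reverse := by
  rw [List.range_succ, List.reverse_append]; rfl

theorem pvBLoop_skip (v st : List Int) (ok : List Bool) (m m' : Nat) (hle : m' ≤ m)
    (hfail : ∀ k, m' ≤ k → k < m → pvBIsRun ok v.length k = false) :
    pvBLoop v st ok ((List.range m).reverse) = pvBLoop v st ok ((List.range m').reverse) := by
  induction m with
  | zero =>
    have h0 : m' = 0 := by omega
    rw [h0]
  | succ m ih =>
    rcases Nat.lt_or_ge m' (m+1) with hlt | hge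
    · have h1 : m' ≤ m := by omega
      rw [pvRangeRev]
      have hne := hfail m h1 (by omega)
      simp only [pvBLoop, hne, Bool.false_eq_true, if_false]
      exact ih h1 (fun k hk1 hk2 => hfail k hk1 (by omega))
    · have h1 : m' = m + 1 := by omega
      rw [h1]

theorem pvSet34 (l : List (Option Int)) (h : l.length = 5) (a b : Option Int) :
    (l.set 3 a).set 4 b = [l.getD 0 none, l.getD 1 none, l.getD 2 none, a, b] := by
  match l, h with
  | [x0, x1, x2, x3, x4], _ => rfl

-- the return case: A's filled array equals B's directly-built list at candidate top i
theorem pvReturnCase (v : List Int) (i : Nat) (si : List (Option Int)) (rest : List Nat)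
    (hin : i + 3 < v.length)
    (h0 : pvS v i = true) (h1 : pvS v (i+1) = true)
    (h2 : pvS v (i+2) = true) (h3 : pvS v (i+3) = true)
    (hlen : si.length = 5)
    (hsi : ∀ j, j < 3 → si.getD j none = some (pvStart v (i + 3 - j))) :
    some ((si.set 3 (some (pvStart v i))).set 4
        (some (if pvStart v i == 0 then v.sum - 1 else pvStart v i - pvAGet v ((i : Int) - 1))))
      = pvBLoop v (v.foldl (fun acc x => acc ++ [acc.getLastD 0 + x]) [0])
          (v.map (fun x => x != 0)) (i :: rest) := by
  have hrun : pvBIsRun (v.map (fun x => x != 0)) v.length i = true := by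
    rw [pvBIsRun_eq, h0, h1, h2, h3]; rfl
  simp only [pvBLoop, hrun, if_true]
  rw [pvSet34 si hlen]
  rw [pvPrefix_getD v (i+3) (by omega), pvPrefix_getD v (i+2) (by omega),
      pvPrefix_getD v (i+1) (by omega), pvPrefix_getD v i (by omega),
      pvPrefix_getD v v.length (by omega)]
  rw [hsi 0 (by omega), hsi 1 (by omega), hsi 2 (by omega)]
  rw [show i + 3 - 0 = i + 3 by omega, show i + 3 - 1 = i + 2 by omega,
      show i + 3 - 2 = i + 1 by omega]
  rw [pvAGet_pred v i (by omega)]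
  have hsum : pvStart v v.length = v.sum := by simp [pvStart]
  rw [hsum]

-- main invariant: A's loop at index i with streak s equals B's loop from candidate top i+s-3
theorem pvMain (v : List Int) : ∀ (i s : Nat) (si : List (Option Int)),
    i + s < v.length → s ≤ 3 →
    (∀ t, 1 ≤ t → t ≤ s → pvS v (i + t) = true) →
    si.length = 5 →
    (∀ j, j < s → si.getD j none = some (pvStart v (i + s - j))) →
    pvALoop v ((List.range (i + 1)).reverse) si (s + 1) (pvStart v (i + 1))
      = pvBLoop v (v.foldl (fun acc x => acc ++ [acc.getLastD 0 + x]) [0])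
          (v.map (fun x => x != 0)) ((List.range (i + s - 2)).reverse) := by
  intro i
  induction i with
  | zero =>
    intro s si hin hs hstreak hlen hsi
    rw [pvRangeRev]
    simp only [pvALoop]
    rw [pvCond_eq v 0 (by omega)]
    have hptr : pvStart v (0 + 1) - pvAGet v ((0 : Nat) : Int) = pvStart v 0 := by
      rw [pvAGet_eq v 0 (by omega), pvStart_succ v 0 (by omega)]; ring
    by_cases hS : pvS v 0 = true
    · simp only [hS, if_true]
      rcases Nat.lt_or_ge s 3 with hslt | hsge
      · -- streak continues but the list is exhausted: A returns none; B's candidates are exhausted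
        have hsm : (s + 1 + 1 == 5) = false := by
          simp only [beq_eq_false_iff_ne, ne_eq]; omega
        simp only [hsm, Bool.false_eq_true, if_false]
        have hr : (0 : Nat) + s - 2 = 0 := by omega
        rw [hr]
        rfl
      · -- s = 3: straight found at top 0
        have hs3 : s = 3 := by omega
        subst hs3
        rw [if_pos (show (3 + 1 + 1 == 5) = true from rfl)]
        simp only [Nat.add_sub_cancel, hptr]
        have hr : (0 : Nat) + 3 - 2 = 0 + 1 := by omega
        rw [hr, pvRangeRev]
        exact pvReturnCase v 0 si _ (by omega) hS
          (hstreak 1 (by omega) (by omega)) (hstreak 2 (by omega) (by omega))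
          (hstreak 3 (by omega) (by omega)) hlen (fun j hj => hsi j hj)
    · -- failure at index 0: A returns none; all of B's remaining candidates fail at index 0
      have hS' : pvS v 0 = false := by revert hS; cases pvS v 0 <;> simp
      simp only [hS', Bool.false_eq_true, if_false]
      have hskip := pvBLoop_skip v
        (v.foldl (fun acc x => acc ++ [acc.getLastD 0 + x]) [0])
        (v.map (fun x => x != 0)) (0 + s - 2) 0 (by omega) ?_
      · rw [hskip]; rfl
      · intro k hk1 hk2
        have hk0 : k = 0 := by omega
        subst hk0
        rw [pvBIsRun_eq, hS']
        rfl
  | succ i ih =>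
    intro s si hin hs hstreak hlen hsi
    rw [pvRangeRev]
    simp only [pvALoop]
    rw [pvCond_eq v (i+1) (by omega)]
    have hptr : pvStart v (i + 1 + 1) - pvAGet v ((i + 1 : Nat) : Int) = pvStart v (i + 1) := by
      rw [pvAGet_eq v (i+1) (by omega), pvStart_succ v (i+1) (by omega)]; ring
    by_cases hS : pvS v (i+1) = true
    · simp only [hS, if_true]
      rcases Nat.lt_or_ge s 3 with hslt | hsge
      · -- streak grows: recurse at i with streak s+1; B's candidate frontier is unchanged
        have hsm : (s + 1 + 1 == 5) = false := by
          simp only [beq_eq_false_iff_ne, ne_eq]; omega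
        simp only [hsm, Bool.false_eq_true, if_false, hptr]
        have happ := ih (s + 1) (si.set (s + 1 - 1) (some (pvStart v (i + 1))))
          (by omega) (by omega)
          (fun t ht1 ht2 => by
            rcases Nat.eq_or_lt_of_le ht1 with ht | ht
            · rw [← ht]; simpa using hS
            · have := hstreak (t - 1) (by omega) (by omega)
              rw [show i + t = i + 1 + (t - 1) by omega]; exact this)
          (by simp [hlen])
          (fun j hj => by
            rcases Nat.lt_or_ge j s with hjs | hjs
            · have he : (si.set (s + 1 - 1) (some (pvStart v (i + 1)))).getD j none
                  = si.getD j none := by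
                simp only [List.getD]
                rw [List.getElem?_set_ne (by omega)]
              rw [he, hsi j hjs, show i + (s + 1) - j = i + 1 + s - j by omega]
            · have hjeq : j = s := by omega
              have he : (si.set (s + 1 - 1) (some (pvStart v (i + 1)))).getD j none
                  = some (pvStart v (i + 1)) := by
                simp only [List.getD]
                rw [show s + 1 - 1 = j by omega, List.getElem?_set_self (by omega)]
                rfl
              rw [he, show i + (s + 1) - j = i + 1 by omega])
        rw [show i + (s + 1) - 2 = i + 1 + s - 2 by omega] at happ
        simpa [Nat.add_sub_cancel] using happ
      · -- s = 3: straight found at top i+1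
        have hs3 : s = 3 := by omega
        subst hs3
        rw [if_pos (show (3 + 1 + 1 == 5) = true from rfl)]
        simp only [Nat.add_sub_cancel, hptr]
        have hr : i + 1 + 3 - 2 = (i + 1) + 1 := by omega
        rw [hr, pvRangeRev]
        exact pvReturnCase v (i+1) si _ (by omega) hS
          (hstreak 1 (by omega) (by omega)) (hstreak 2 (by omega) (by omega))
          (hstreak 3 (by omega) (by omega)) hlen (fun j hj => hsi j hj)
    · -- failure at index i+1: streak resets; B skips the candidates whose run crosses i+1
      have hS' : pvS v (i+1) = false := by revert hS; cases pvS v (i+1) <;> simp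
      simp only [hS', Bool.false_eq_true, if_false]
      have happ := ih 0 si (by omega) (by omega)
        (fun t ht1 ht2 => absurd (ht1.trans ht2) (by omega))
        hlen (fun j hj => absurd hj (by omega))
      rw [Nat.add_zero, Nat.zero_add] at happ
      rw [hptr, happ]
      apply Eq.symm
      apply pvBLoop_skip
      · omega
      · intro k hk1 hk2
        rw [pvBIsRun_eq]
        have h4 : k = i + 1 ∨ k + 1 = i + 1 ∨ k + 2 = i + 1 ∨ k + 3 = i + 1 := by omega
        rcases h4 with h4 | h4 | h4 | h4 <;> rw [← h4] at hS' <;> simp [hS']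
  -- (the omega-closed hypotheses above are vacuous: t ≤ 0 / j < 0 cases)

-- ===== VERDICT (by name: the statement is the Claim_ definition above) =====
theorem getStraightIndices_py_spec : Claim_equal_getStraightIndices_py := by
  intro v _
  unfold Spec_getStraightIndices_py getStraightIndices_py getStraightIndices_py_alt
  rcases Nat.eq_zero_or_pos v.length with h0 | hpos
  · rw [h0]
    rfl
  · obtain ⟨m, hm⟩ : ∃ m, v.length = m + 1 := ⟨v.length - 1, by omega⟩
    rw [hm]
    have hsum : v.sum = pvStart v (m + 1) := by
      rw [← hm]; simp [pvStart]
    rw [hsum]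
    have := pvMain v m 0 (List.replicate 5 none) (by omega) (by omega)
      (fun t ht1 ht2 => absurd (ht1.trans ht2) (by omega)) (by simp)
      (fun j hj => absurd hj (by omega))
    rw [this]
    rw [show m + 0 - 2 = m + 1 - 3 by omega]
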